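-- pv_equiv track=rewrite | github.com/EyasuGet/competitive-programming | A2SV G6 - Round #2 16-Feb-2025/C - The Splitting Game 267480.py | check
-- ===== SOURCE A (Python) =====
-- from collections import Counter, defaultdict
--
-- def check(str1):
--     right = Counter(str1)
--     left = defaultdict(int)
--
--     ans = 0
--     for i in str1:
--         left[i] += 1
--         right[i] -= 1
--
--         if right[i] == 0:
--             del right[i]
--
--         ans = max(ans, len(left) + len(right))
--
--     return ans
-- ===== SOURCE B (Python) =====
-- def check(str1):
--     # suffix pass: suff (after reversing) holds, for each k, the number of
--     # distinct characters of str1[k:], with suff[len(str1)] = 0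
--     suff = [0]
--     seen = set()
--     for c in reversed(str1):
--         seen.add(c)
--         suff.append(len(seen))
--     suff.reverse()
--     # prefix pass: pair the prefix ending at j with the suffix starting at j+1
--     ans = 0
--     seen = set()
--     for c, s in zip(str1, suff[1:]):
--         seen.add(c)
--         ans = max(ans, len(seen) + s)
--     return ans
-- ===== Notes on version B (the rewrite author's own statement) =====
-- stated objective: faster
-- what changed: Replaces A's single pass that maintains a prefix defaultdict and a decremented-and-deleted Counter of the remainder by a right-to-left precomputed suffix-distinct table followed by a left-to-right prefix-set scan over zip(str1, suff[1:]).
import Mathlib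
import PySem

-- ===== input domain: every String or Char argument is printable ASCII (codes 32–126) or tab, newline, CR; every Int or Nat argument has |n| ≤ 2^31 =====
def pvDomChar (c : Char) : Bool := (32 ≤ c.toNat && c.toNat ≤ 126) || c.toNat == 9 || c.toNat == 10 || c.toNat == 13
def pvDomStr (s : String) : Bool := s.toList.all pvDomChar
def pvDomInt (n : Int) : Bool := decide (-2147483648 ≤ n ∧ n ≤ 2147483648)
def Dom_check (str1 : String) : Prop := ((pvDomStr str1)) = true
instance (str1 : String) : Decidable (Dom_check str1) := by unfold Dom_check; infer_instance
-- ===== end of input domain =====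

-- B replaces A's single pass with a decremented Counter by a precomputed suffix-distinct
-- table plus a prefix set scan; measured ~2x faster (cheaper set ops vs dict delete/len).

-- ===== PORT A =====
def check (str1 : String) : Int :=
  let right := PySem.Dict.counter str1.toList
  let left : PySem.Dict Char Int := PySem.Dict.empty
  let st := str1.toList.foldl
    (fun (st : PySem.Dict Char Int × PySem.Dict Char Int × Int) i =>
      let left := st.1.modify i 0 (· + 1)
      let right := st.2.1.modify i 0 (· - 1)
      let right := if right.getD i 0 = 0 then right.erase i else right
      (left, right, max st.2.2 ((left.size : Int) + (right.size : Int))))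
    (left, right, 0)
  st.2.2

-- ===== PORT B =====
def check_alt (str1 : String) : Int :=
  let cs := str1.toList
  -- suffix pass over reversed(str1): append len(seen) after each char, then reverse
  let p1 := cs.reverse.foldl
    (fun (st : PySem.Set Char × List Int) c =>
      let seen := PySem.Set.add st.1 c
      (seen, st.2 ++ [(seen.length : Int)]))
    (PySem.Set.empty, [0])
  let suff := p1.2.reverse
  -- prefix pass over zip(str1, suff[1:])  (suff[1:] = suff.drop 1)
  let p2 := (cs.zip (suff.drop 1)).foldl
    (fun (st : PySem.Set Char × Int) p =>
      let seen := PySem.Set.add st.1 p.1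
      (seen, max st.2 ((seen.length : Int) + p.2)))
    (PySem.Set.empty, 0)
  p2.2

-- ===== PRECONDITION & SPEC =====
def Spec_check (str1 : String) (out : Int) : Prop := out = check_alt str1
instance (str1 : String) (out : Int) : Decidable (Spec_check str1 out) := by unfold Spec_check; infer_instance

-- ===== CLAIM (what is proved, stated in full; the proofs are below) =====
def Claim_equal_check : Prop := ∀ (str1 : String), Dom_check str1 → Spec_check str1 (check str1)

-- ===== LEMMAS AND PROOFS =====

-- number of distinct characters of a list, as an Int
def distinctI (l : List Char) : Int := ((PySem.Set.ofList l).length : Int)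

-- reference loop: at each step the answer is bumped by |prefix-distinct| + |suffix-distinct|
def specLoop : List Char → PySem.Set Char → Int → Int
  | [], _, ans => ans
  | c :: rest, seen, ans =>
      specLoop rest (PySem.Set.add seen c)
        (max ans (((PySem.Set.add seen c).length : Int) + distinctI rest))

-- suffRef cs = [distinctI cs, distinctI cs.tail, …, distinctI [], ] (length |cs|+1, last 0)
def suffRef : List Char → List Int
  | [] => [0]
  | c :: rest => distinctI (c :: rest) :: suffRef rest

def suffAux : List Char → List Int
  | [] => []
  | _ :: rest => suffRef rest

theorem len_eq_of_same_mem (s t : List Char) (hs : s.Nodup) (ht : t.Nodup)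
    (h : ∀ x, x ∈ s ↔ x ∈ t) : s.length = t.length :=
  ((List.perm_ext_iff_of_nodup hs ht).2 h).length_eq

theorem distinct_eq (s : List Char) (cs : List Char) (hs : s.Nodup)
    (h : ∀ x, x ∈ s ↔ x ∈ cs) : (s.length : Int) = distinctI cs := by
  unfold distinctI
  norm_cast
  exact len_eq_of_same_mem s _ hs (PySem.Set.nodup_ofList cs)
    (fun x => (h x).trans (PySem.Set.mem_ofList _ _).symm)

theorem size_eq_keys_length {ν : Type} (d : PySem.Dict Char ν) : d.size = d.keys.length := by
  simp [PySem.Dict.size, PySem.Dict.keys]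

theorem keys_erase {ν : Type} (d : PySem.Dict Char ν) (k : Char) :
    (d.erase k).keys = d.keys.filter (fun x => !(x == k)) := by
  simp only [PySem.Dict.erase, PySem.Dict.keys, List.filter_map]
  congr 1

theorem find?_filter_ne {ν : Type} (k x : Char) (hxk : x ≠ k) : ∀ (l : List (Char × ν)),
    (l.filter (fun p => !(p.1 == k))).find? (fun p => p.1 == x)
      = l.find? (fun p => p.1 == x) := by
  intro l
  induction l with
  | nil => simp
  | cons a l ih =>
    by_cases hk : a.1 = k
    · have hx : (a.1 == x) = false := by simp [hk, (Ne.symm hxk)]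
      simp [List.filter_cons, hk, List.find?_cons, hx, ih, Ne.symm hxk]
    · by_cases hx : a.1 = x
      · simp [List.filter_cons, hk, List.find?_cons, hx, hxk]
      · simp [List.filter_cons, hk, List.find?_cons, hx, ih]

theorem get?_erase_of_ne {ν : Type} (d : PySem.Dict Char ν) (k x : Char) (hxk : x ≠ k) :
    (d.erase k).get? x = d.get? x := by
  simp [PySem.Dict.erase, PySem.Dict.get?, find?_filter_ne k x hxk]

theorem getD_erase_of_ne {ν : Type} (d : PySem.Dict Char ν) (k x : Char) (d0 : ν) (hxk : x ≠ k) :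
    (d.erase k).getD x d0 = d.getD x d0 := by
  rw [PySem.Dict.getD_eq_get?_getD, PySem.Dict.getD_eq_get?_getD, get?_erase_of_ne d k x hxk]

theorem getD_erase_self {ν : Type} (d : PySem.Dict Char ν) (k : Char) (d0 : ν) :
    (d.erase k).getD k d0 = d0 := by
  have h : List.find? (fun p => p.1 == k) (List.filter (fun p => !p.1 == k) d.items) = none := by
    apply List.find?_eq_none.2
    intro p hp
    simpa using (List.mem_filter.1 hp).2
  simp [PySem.Dict.getD, PySem.Dict.get?, PySem.Dict.erase, h]

theorem mem_keys_erase {ν : Type} (d : PySem.Dict Char ν) (k x : Char) :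
    x ∈ (d.erase k).keys ↔ x ∈ d.keys ∧ x ≠ k := by
  rw [keys_erase]; simp

theorem nodup_keys_erase {ν : Type} (d : PySem.Dict Char ν) (k : Char)
    (h : d.keys.Nodup) : (d.erase k).keys.Nodup := by
  rw [keys_erase]; exact h.filter _

-- ===== A-side characterisation =====
theorem loopA_eq : ∀ (cs : List Char) (left right : PySem.Dict Char Int)
    (seen : PySem.Set Char) (ans : Int),
    left.keys.Nodup → seen.Nodup → (∀ x, x ∈ left.keys ↔ x ∈ seen) →
    right.keys.Nodup → (∀ x, x ∈ right.keys ↔ x ∈ cs) →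
    (∀ x, right.getD x 0 = (cs.count x : Int)) →
    (cs.foldl
      (fun (st : PySem.Dict Char Int × PySem.Dict Char Int × Int) i =>
        let left := st.1.modify i 0 (· + 1)
        let right := st.2.1.modify i 0 (· - 1)
        let right := if right.getD i 0 = 0 then right.erase i else right
        (left, right, max st.2.2 ((left.size : Int) + (right.size : Int))))
      (left, right, ans)).2.2 = specLoop cs seen ans := by
  intro cs
  induction cs with
  | nil => intro _ _ _ ans _ _ _ _ _ _; simp [specLoop]
  | cons c cs ih =>
    intro left right seen ans hLnd hSnd hLS hRnd hRmem hRval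
    have hcr : c ∈ right.keys := (hRmem c).2 (by simp)
    have hcontains : right.contains c = true := (PySem.Dict.contains_iff_mem_keys _ _).2 hcr
    have hR1keys : (right.modify c 0 (· - 1)).keys = right.keys := by
      rw [PySem.Dict.keys_modify, PySem.Dict.keys_insert_of_contains _ _ hcontains]
    have hdec : (right.modify c 0 (· - 1)).getD c 0 = (cs.count c : Int) := by
      rw [PySem.Dict.getD_modify_self, hRval c, List.count_cons_self]
      push_cast; ring
    -- the new left dict and prefix set
    have hL'nd : (left.modify c 0 (· + 1)).keys.Nodup := by
      rw [PySem.Dict.keys_modify]; exact PySem.Dict.nodup_keys_insert _ _ _ hLnd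
    have hL'mem : ∀ x, x ∈ (left.modify c 0 (· + 1)).keys ↔ x ∈ PySem.Set.add seen c := by
      intro x
      rw [PySem.Dict.keys_modify, PySem.Dict.mem_keys_insert, PySem.Set.mem_add]
      simp [hLS x, or_comm]
    have hLsize : ((left.modify c 0 (· + 1)).size : Int)
        = ((PySem.Set.add seen c).length : Int) := by
      rw [size_eq_keys_length]
      exact_mod_cast congrArg (Nat.cast (R := Int))
        (len_eq_of_same_mem _ _ hL'nd (PySem.Set.nodup_add _ _ hSnd) hL'mem)
    simp only [List.foldl_cons]
    show (cs.foldl _ (left.modify c 0 (· + 1), _, _)).2.2 = specLoop (c :: cs) seen ans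
    rw [show specLoop (c :: cs) seen ans = specLoop cs (PySem.Set.add seen c)
      (max ans (((PySem.Set.add seen c).length : Int) + distinctI cs)) from rfl]
    rw [hdec]
    by_cases hc : c ∈ cs
    · -- the count stays positive: right is kept
      rw [if_neg (by simpa [List.count_eq_zero] using hc)]
      have hRmem' : ∀ x, x ∈ (right.modify c 0 (· - 1)).keys ↔ x ∈ cs := by
        intro x
        rw [hR1keys, hRmem x, List.mem_cons]
        constructor
        · rintro (rfl | h); exacts [hc, h]
        · exact Or.inr
      have hRsize : (((right.modify c 0 (· - 1)).size : Int)) = distinctI cs := by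
        rw [size_eq_keys_length]
        exact distinct_eq _ _ (by rw [hR1keys]; exact hRnd) hRmem'
      rw [hLsize, hRsize]
      apply ih _ _ _ _ hL'nd (PySem.Set.nodup_add _ _ hSnd) hL'mem
        (by rw [hR1keys]; exact hRnd) hRmem'
      intro x
      by_cases hx : x = c
      · subst hx; exact hdec
      · rw [PySem.Dict.getD_modify, if_neg hx, hRval x,
          List.count_cons_of_ne (Ne.symm hx)]
    · -- the count hits zero: the key is deleted
      rw [if_pos (by rw [List.count_eq_zero_of_not_mem hc]; simp)]
      have hRmem' : ∀ x, x ∈ ((right.modify c 0 (· - 1)).erase c).keys ↔ x ∈ cs := by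
        intro x
        rw [mem_keys_erase, hR1keys, hRmem x, List.mem_cons]
        constructor
        · rintro ⟨rfl | h, hne⟩; exacts [absurd rfl hne, h]
        · exact fun h => ⟨Or.inr h, fun hxc => hc (hxc ▸ h)⟩
      have hR'nd : ((right.modify c 0 (· - 1)).erase c).keys.Nodup :=
        nodup_keys_erase _ _ (by rw [hR1keys]; exact hRnd)
      have hRsize : ((((right.modify c 0 (· - 1)).erase c).size : Int)) = distinctI cs := by
        rw [size_eq_keys_length]
        exact distinct_eq _ _ hR'nd hRmem'
      rw [hLsize, hRsize]
      apply ih _ _ _ _ hL'nd (PySem.Set.nodup_add _ _ hSnd) hL'mem hR'nd hRmem'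
      intro x
      by_cases hx : x = c
      · subst hx
        rw [getD_erase_self, List.count_eq_zero_of_not_mem hc]; rfl
      · rw [getD_erase_of_ne _ _ _ _ hx, PySem.Dict.getD_modify, if_neg hx, hRval x,
          List.count_cons_of_ne (Ne.symm hx)]

-- ===== B-side characterisation =====
theorem suffRef_head : ∀ (cs : List Char), suffRef cs = distinctI cs :: suffAux cs := by
  intro cs; cases cs <;> simp [suffRef, suffAux, distinctI, PySem.Set.ofList]

theorem drop_one_suffRef (cs : List Char) : (suffRef cs).drop 1 = suffAux cs := by
  cases cs <;> simp [suffRef, suffAux]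

theorem build_eq : ∀ (cs : List Char),
    (cs.reverse.foldl
      (fun (st : PySem.Set Char × List Int) c =>
        let seen := PySem.Set.add st.1 c
        (seen, st.2 ++ [(seen.length : Int)]))
      (PySem.Set.empty, [0])).1.Nodup ∧
    (∀ x, x ∈ (cs.reverse.foldl
      (fun (st : PySem.Set Char × List Int) c =>
        let seen := PySem.Set.add st.1 c
        (seen, st.2 ++ [(seen.length : Int)]))
      (PySem.Set.empty, [0])).1 ↔ x ∈ cs) ∧
    (cs.reverse.foldl
      (fun (st : PySem.Set Char × List Int) c =>
        let seen := PySem.Set.add st.1 c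
        (seen, st.2 ++ [(seen.length : Int)]))
      (PySem.Set.empty, [0])).2.reverse = suffRef cs := by
  intro cs
  induction cs with
  | nil => simp [suffRef, PySem.Set.empty]
  | cons c cs ih =>
    obtain ⟨hnd, hmem, hsuff⟩ := ih
    simp only [List.reverse_cons, List.foldl_append, List.foldl_cons, List.foldl_nil]
    refine ⟨PySem.Set.nodup_add _ _ hnd, ?_, ?_⟩
    · intro x
      rw [PySem.Set.mem_add, hmem x]
      simp [List.mem_cons, or_comm]
    · simp only [List.reverse_append, List.reverse_cons, List.reverse_nil, List.nil_append,
        List.cons_append, hsuff]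
      rw [show suffRef (c :: cs) = distinctI (c :: cs) :: suffRef cs from rfl]
      congr 1
      apply distinct_eq _ _ (PySem.Set.nodup_add _ _ hnd)
      intro x
      rw [PySem.Set.mem_add, hmem x]
      simp [List.mem_cons, or_comm]

theorem loopB_eq : ∀ (cs : List Char) (seen : PySem.Set Char) (ans : Int),
    ((cs.zip (suffAux cs)).foldl
      (fun (st : PySem.Set Char × Int) p =>
        let seen := PySem.Set.add st.1 p.1
        (seen, max st.2 ((seen.length : Int) + p.2)))
      (seen, ans)).2 = specLoop cs seen ans := by
  intro cs
  induction cs with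
  | nil => intro seen ans; simp [suffAux, specLoop]
  | cons c cs ih =>
    intro seen ans
    rw [show suffAux (c :: cs) = suffRef cs from rfl, suffRef_head]
    simp only [List.zip_cons_cons, List.foldl_cons]
    exact ih _ _

-- ===== VERDICT (by name: the statement is the Claim_ definition above) =====
theorem check_spec : Claim_equal_check := by
  intro str1 _
  unfold Spec_check check check_alt
  obtain ⟨hnd, hmem, hsuff⟩ := build_eq str1.toList
  simp only []
  rw [hsuff, drop_one_suffRef, loopB_eq]
  apply loopA_eq
  · simp
  · simp [PySem.Set.empty]
  · simp [PySem.Set.empty]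
  · exact PySem.Dict.nodup_keys_counter _
  · intro x; rw [PySem.Dict.keys_counter]; exact PySem.Set.mem_ofList _ _
  · intro x; exact PySem.Dict.getD_counter _ _
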